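-- pv_equiv track=rewrite | github.com/OviyaMuniyappan/chocolate-jar | chocolate jar.py | cal_cho
-- ===== SOURCE A (Python) =====
-- def cal_cho(jars):
--     total_chocolates_A = 0
--     for jar in jars:
--         chocolates_in_jar = jar
--         while chocolates_in_jar > 0:
--
--             total_chocolates_A += 1
--             chocolates_in_jar -= 1
--             if chocolates_in_jar == 0:
--                 break
--
--             chocolates_in_jar -= 1
--             if chocolates_in_jar == 0:
--                 break
--
--             chocolates_in_jar -= 1
--     return total_chocolates_A
-- ===== SOURCE B (Python) =====
-- def cal_cho(jars):
--     return sum((jar + 2) // 3 for jar in jars if jar > 0)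
-- ===== Notes on version B (the rewrite author's own statement) =====
-- stated objective: faster
-- what changed: Replaces the per-chocolate inner while loop with the closed form ceil(jar/3) = (jar+2)//3 summed over positive jars.
import Mathlib
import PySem

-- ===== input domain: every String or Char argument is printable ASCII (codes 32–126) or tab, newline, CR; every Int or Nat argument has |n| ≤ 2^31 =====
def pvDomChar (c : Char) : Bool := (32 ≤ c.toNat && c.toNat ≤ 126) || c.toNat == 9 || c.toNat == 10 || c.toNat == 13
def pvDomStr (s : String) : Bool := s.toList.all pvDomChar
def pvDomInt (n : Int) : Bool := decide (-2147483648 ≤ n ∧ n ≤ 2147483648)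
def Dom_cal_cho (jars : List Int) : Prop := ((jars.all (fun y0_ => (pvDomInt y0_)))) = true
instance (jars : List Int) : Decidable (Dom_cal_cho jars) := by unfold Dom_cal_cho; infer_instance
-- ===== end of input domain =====

-- B replaces A's per-chocolate inner while loop by the closed form (jar+2)//3 per positive jar (faster).

-- ===== PORT A =====
-- inner while loop of A: c = chocolates_in_jar, t = total_chocolates_A
def cal_cho_while (c : Int) (t : Int) : Int :=
  if h : c > 0 then
    let t := t + 1
    let c := c - 1
    if c = 0 then t
    else
      let c := c - 1
      if c = 0 then t
      else cal_cho_while (c - 1) t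
  else t
termination_by c.toNat
decreasing_by omega

def cal_cho (jars : List Int) : Int :=
  jars.foldl (fun total jar => cal_cho_while jar total) 0

-- ===== PORT B =====
def cal_cho_alt (jars : List Int) : Int :=
  jars.foldl (fun acc jar => if jar > 0 then acc + PySem.Int.floordiv (jar + 2) 3 else acc) 0

-- ===== PRECONDITION & SPEC =====
def Spec_cal_cho (jars : List Int) (out : Int) : Prop := out = cal_cho_alt jars
instance (jars : List Int) (out : Int) : Decidable (Spec_cal_cho jars out) := by unfold Spec_cal_cho; infer_instance

-- ===== CLAIM (what is proved, stated in full; the proofs are below) =====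
def Claim_equal_cal_cho : Prop := ∀ (jars : List Int), Dom_cal_cho jars → Spec_cal_cho jars (cal_cho jars)

-- ===== LEMMAS AND PROOFS =====

-- the inner while loop computes t + ceil(c/3) for positive c
theorem cal_cho_while_eq (c t : Int) :
    cal_cho_while c t = t + (if c > 0 then PySem.Int.floordiv (c + 2) 3 else 0) := by
  by_cases h : c > 0
  · induction hn : c.toNat using Nat.strong_induction_on generalizing c t with
    | _ n ih =>
      rw [cal_cho_while]
      simp only [h, dif_pos]
      by_cases h1 : c - 1 = 0
      · have : c = 1 := by omega
        subst this
        simp [PySem.Int.floordiv]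
      · simp only [h1]
        by_cases h2 : c - 1 - 1 = 0
        · have : c = 2 := by omega
          subst this
          simp [PySem.Int.floordiv]
        · simp only [h2]
          have e : c - 1 - 1 - 1 = c - 3 := by ring
          by_cases h3 : c - 3 > 0
          · simp only [h1, h2, if_neg, e]
            rw [ih (c - 3).toNat (by omega) (c - 3) (t + 1) h3 rfl]
            simp only [h3, if_pos, h, if_pos]
            rw [PySem.Int.floordiv_eq_ediv_of_pos (by omega),
                PySem.Int.floordiv_eq_ediv_of_pos (by omega)]
            clear ih hn
            simp only [if_neg not_false]
            omega
          · have : c = 3 := by omega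
            subst this
            rw [cal_cho_while]
            norm_num [PySem.Int.floordiv]
            decide
  · rw [cal_cho_while]
    simp [h]

theorem foldl_eq (jars : List Int) : ∀ t : Int,
    jars.foldl (fun total jar => cal_cho_while jar total) t
      = jars.foldl (fun acc jar => if jar > 0 then acc + PySem.Int.floordiv (jar + 2) 3 else acc) t := by
  induction jars with
  | nil => intro t; rfl
  | cons j js ih =>
    intro t
    simp only [List.foldl_cons]
    rw [cal_cho_while_eq, ih]
    by_cases h : j > 0 <;> simp [h]

-- ===== VERDICT (by name: the statement is the Claim_ definition above) =====
theorem cal_cho_spec : Claim_equal_cal_cho := by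
  intro jars _
  unfold Spec_cal_cho cal_cho cal_cho_alt
  exact foldl_eq jars 0
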